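-- pv_equiv track=rewrite | github.com/EthanHaque/image_steganography | refactoring/manipulatePixels.py | binarize3DDigits
-- ===== SOURCE A (Python) =====
-- def binarize3DDigits(array3D):
--     binArray = []
--     for i in range(2):
--         binArray.append([])
--         for y in range(len(array3D)):
--             binArray[i].append([])
--             for x in range(len(array3D[0])):
--                 binArray[i][y].append(())
--                 for z in range(len(array3D[0][0])):
--                     decimal = array3D[y][x][z]
--                     binaryNum = bin(decimal)[2:]
--                     paddedBinaryNum = (8 - len(binaryNum)) * "0" + binaryNum
--                     if(i == 0):
--                         binArray[i][y][x] += (paddedBinaryNum[:4],)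
--                     else:
--                         binArray[i][y][x] += (paddedBinaryNum[4:],)
--     return(binArray)
-- ===== SOURCE B (Python) =====
-- def binarize3DDigits(array3D):
--     high = []
--     low = []
--     for y in range(len(array3D)):
--         highRow = []
--         lowRow = []
--         for x in range(len(array3D[0])):
--             highTup = ()
--             lowTup = ()
--             for z in range(len(array3D[0][0])):
--                 binaryNum = bin(array3D[y][x][z])[2:]
--                 padded = (8 - len(binaryNum)) * "0" + binaryNum
--                 highTup += (padded[:4],)
--                 lowTup += (padded[4:],)
--             highRow.append(highTup)
--             lowRow.append(lowTup)
--         high.append(highRow)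
--         low.append(lowRow)
--     return [high, low]
-- ===== Notes on version B (the rewrite author's own statement) =====
-- stated objective: faster
-- what changed: B makes a single pass over the array building the high-nibble and low-nibble structures simultaneously (computing bin() and the padding once per element, and appending completed tuples), instead of A's two full passes that recompute the binary string of every element for each half.
import Mathlib
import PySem

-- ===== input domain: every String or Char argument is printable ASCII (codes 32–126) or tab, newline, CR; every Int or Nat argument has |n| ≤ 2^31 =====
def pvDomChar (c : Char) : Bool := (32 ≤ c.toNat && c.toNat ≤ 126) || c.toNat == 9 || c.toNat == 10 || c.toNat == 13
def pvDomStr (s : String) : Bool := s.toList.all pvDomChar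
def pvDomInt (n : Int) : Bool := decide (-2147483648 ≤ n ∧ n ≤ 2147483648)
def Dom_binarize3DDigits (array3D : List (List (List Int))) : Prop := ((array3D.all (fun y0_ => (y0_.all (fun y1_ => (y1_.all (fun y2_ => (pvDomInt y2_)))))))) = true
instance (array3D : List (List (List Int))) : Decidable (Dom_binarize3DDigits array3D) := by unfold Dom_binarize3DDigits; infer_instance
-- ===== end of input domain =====

-- B fuses A's two identical outer passes into one pass computing both nibble halves at once (objective: faster by a constant factor).


-- ===== PORT A =====
-- shared by both ports (both Pythons run the same two lines per element):
-- binaryNum = bin(decimal)[2:]  (PySem.Int.toBinChars0b is bin(); [2:] with nonneg start is List.drop 2)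
-- paddedBinaryNum = (8 - len(binaryNum)) * "0" + binaryNum  (Nat subtraction clamps at 0, like Python's negative string multiplier)
def pvPadded (decimal : Int) : List Char :=
  let binaryNum := (PySem.Int.toBinChars0b decimal).drop 2
  List.replicate (8 - binaryNum.length) '0' ++ binaryNum

def binarize3DDigits (array3D : List (List (List Int))) : List (List (List (List String))) :=
  (PySem.List.pyRange 0 2 1).foldl (fun binArray i =>
    binArray ++ [
      (PySem.List.pyRange 0 (PySem.List.len array3D) 1).foldl (fun rows y =>
        rows ++ [
          (PySem.List.pyRange 0 (PySem.List.len (PySem.List.pyGetD array3D 0 [])) 1).foldl (fun cols x =>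
            cols ++ [
              (PySem.List.pyRange 0 (PySem.List.len (PySem.List.pyGetD (PySem.List.pyGetD array3D 0 []) 0 [])) 1).foldl (fun tup z =>
                let decimal := PySem.List.pyGetD (PySem.List.pyGetD (PySem.List.pyGetD array3D y []) x []) z 0
                let paddedBinaryNum := pvPadded decimal
                if i == 0 then tup ++ [String.ofList (paddedBinaryNum.take 4)]
                else tup ++ [String.ofList (paddedBinaryNum.drop 4)]) []
            ]) []
        ]) []
    ]) []

-- ===== PORT B =====
def binarize3DDigits_alt (array3D : List (List (List Int))) : List (List (List (List String))) :=
  let res :=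
    (PySem.List.pyRange 0 (PySem.List.len array3D) 1).foldl (fun (acc : List (List (List String)) × List (List (List String))) y =>
      let rowPair :=
        (PySem.List.pyRange 0 (PySem.List.len (PySem.List.pyGetD array3D 0 [])) 1).foldl (fun (acc2 : List (List String) × List (List String)) x =>
          let tups :=
            (PySem.List.pyRange 0 (PySem.List.len (PySem.List.pyGetD (PySem.List.pyGetD array3D 0 []) 0 [])) 1).foldl (fun (t : List String × List String) z =>
              let padded := pvPadded (PySem.List.pyGetD (PySem.List.pyGetD (PySem.List.pyGetD array3D y []) x []) z 0)
              (t.1 ++ [String.ofList (padded.take 4)], t.2 ++ [String.ofList (padded.drop 4)])) ([], [])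
          (acc2.1 ++ [tups.1], acc2.2 ++ [tups.2])) ([], [])
      (acc.1 ++ [rowPair.1], acc.2 ++ [rowPair.2])) ([], [])
  [res.1, res.2]

-- ===== PRECONDITION & SPEC =====
-- Pre_ excludes exactly the ragged inputs on which the Python (both A and B: same index ranges) raises
-- IndexError: when the z-range is nonempty, every row must be at least as long as row 0, and every indexed
-- inner list at least as long as array3D[0][0].
def Pre_binarize3DDigits (array3D : List (List (List Int))) : Prop :=
  0 < ((array3D.headD []).headD []).length →
    ∀ row ∈ array3D, (array3D.headD []).length ≤ row.length ∧
      ∀ x < (array3D.headD []).length,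
        ((array3D.headD []).headD []).length ≤ (row.getD x []).length
instance (array3D : List (List (List Int))) : Decidable (Pre_binarize3DDigits array3D) := by unfold Pre_binarize3DDigits; infer_instance

def pvWitness_binarize3DDigits : List (List (List Int)) := [[[1, 200], [3, 255]], [[0, -5], [256, 7]]]

def Spec_binarize3DDigits (array3D : List (List (List Int))) (out : List (List (List (List String)))) : Prop := out = binarize3DDigits_alt array3D
instance (array3D : List (List (List Int))) (out : List (List (List (List String)))) : Decidable (Spec_binarize3DDigits array3D out) := by unfold Spec_binarize3DDigits; infer_instance

-- ===== CLAIM (what is proved, stated in full; the proofs are below) =====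
def Claim_equal_binarize3DDigits : Prop := ∀ (array3D : List (List (List Int))), Dom_binarize3DDigits array3D → Pre_binarize3DDigits array3D → Spec_binarize3DDigits array3D (binarize3DDigits array3D)

-- ===== LEMMAS AND PROOFS =====

-- a fold appending to both components of a pair is a pair of maps
theorem pv_foldl_pair_append {α β γ : Type} (f : α → β) (g : α → γ) (l : List α) (a : List β) (b : List γ) :
    l.foldl (fun acc e => (acc.1 ++ [f e], acc.2 ++ [g e])) (a, b) = (a ++ l.map f, b ++ l.map g) := by
  rw [PySem.List.foldl_prod_mk (f := fun s e => s ++ [f e]) (g := fun s e => s ++ [g e]),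
    PySem.List.foldl_append_singleton_eq_map, PySem.List.foldl_append_singleton_eq_map]

theorem pv_flatten_map_singleton {α β : Type} (f : α → β) (l : List α) :
    (List.map (fun x => [f x]) l).flatten = List.map f l := by
  induction l with
  | nil => rfl
  | cons h t ih => simp only [List.map_cons, List.flatten_cons, ih, List.singleton_append]

-- ===== VERDICT (by name: the statement is the Claim_ definition above) =====
theorem binarize3DDigits_spec : Claim_equal_binarize3DDigits := by
  intro array3D _ _
  unfold Spec_binarize3DDigits binarize3DDigits binarize3DDigits_alt
  have h2 : PySem.List.pyRange 0 2 1 = [0, 1] := by decide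
  simp only [h2, pv_foldl_pair_append, PySem.List.foldl_append_singleton_eq_map,
    List.nil_append]
  norm_num
  exact ⟨fun _ _ _ _ _ _ => pv_flatten_map_singleton _ _, fun _ _ _ _ _ _ => pv_flatten_map_singleton _ _⟩
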